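-- pv_equiv track=rewrite | github.com/superhughhh/classic_python_algorithme | str_algo/min_number_in_str.py | minNumberInStr
-- ===== SOURCE A (Python) =====
-- def minNumberInStr(str):
--
--     digit_list = []
--     for i in str:
--         if i.isdigit():
--             digit_list.append(i)
--
--     min_number = digit_list[0]
--
--     for i in digit_list:
--         if i < min_number:
--             min_number = i
--     return min_number
-- ===== SOURCE B (Python) =====
-- def minNumberInStr(str):
--     return sorted([c for c in str if c.isdigit()])[0]
-- ===== Notes on version B (the rewrite author's own statement) =====
-- stated objective: simpler
-- what changed: Replaces the explicit seed-and-scan minimum loop by sorting the collected digit characters and taking the first element.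
import Mathlib
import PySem

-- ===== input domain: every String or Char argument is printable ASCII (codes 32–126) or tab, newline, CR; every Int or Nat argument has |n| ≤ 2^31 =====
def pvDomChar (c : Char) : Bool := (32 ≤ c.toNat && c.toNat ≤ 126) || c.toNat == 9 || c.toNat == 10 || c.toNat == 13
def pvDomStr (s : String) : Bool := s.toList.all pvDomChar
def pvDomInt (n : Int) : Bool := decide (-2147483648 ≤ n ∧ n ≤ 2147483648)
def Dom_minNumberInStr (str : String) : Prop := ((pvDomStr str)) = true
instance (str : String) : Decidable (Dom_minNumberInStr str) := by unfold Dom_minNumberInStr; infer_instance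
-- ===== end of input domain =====

-- B changes A's second pass: instead of scanning the collected digits for the minimum,
-- it sorts them and returns the first element (objective: simpler).
-- Pre_ excludes strings with no digit character, on which both programs raise IndexError.

-- ===== PORT A =====
def minNumberInStr (str : String) : String :=
  let digitList : List Char :=
    str.toList.foldl (fun acc i => if PySem.Chars.isdigit i then acc ++ [i] else acc) []
  match PySem.List.pyGet? digitList 0 with
  | none => ""  -- digit_list[0] raises IndexError in Python; excluded by Pre_
  | some m0 =>
    let minNumber := digitList.foldl (fun mn i => if i < mn then i else mn) m0
    String.ofList [minNumber]

-- ===== PORT B =====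
def minNumberInStr_alt (str : String) : String :=
  let ds : List Char := str.toList.filter PySem.Chars.isdigit
  match PySem.List.pyGet? (PySem.List.sorted ds (fun c => c) false) 0 with
  | none => ""  -- [0] on the empty sorted list raises IndexError; excluded by Pre_
  | some m => String.ofList [m]

-- ===== PRECONDITION & SPEC =====
-- Pre_: the string contains at least one digit; otherwise A (and B) raise IndexError.
def Pre_minNumberInStr (str : String) : Prop := str.toList.any PySem.Chars.isdigit = true
instance (str : String) : Decidable (Pre_minNumberInStr str) := by unfold Pre_minNumberInStr; infer_instance
def pvWitness_minNumberInStr : String := "a41b"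

def Spec_minNumberInStr (str : String) (out : String) : Prop := out = minNumberInStr_alt str
instance (str : String) (out : String) : Decidable (Spec_minNumberInStr str out) := by unfold Spec_minNumberInStr; infer_instance

-- ===== CLAIM (what is proved, stated in full; the proofs are below) =====
def Claim_equal_minNumberInStr : Prop := ∀ (str : String), Dom_minNumberInStr str → Pre_minNumberInStr str → Spec_minNumberInStr str (minNumberInStr str)

-- ===== LEMMAS AND PROOFS =====

-- A's append-accumulator digit collection is List.filter
theorem foldl_append_filter (l : List Char) (acc : List Char) :
    l.foldl (fun acc i => if PySem.Chars.isdigit i then acc ++ [i] else acc) acc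
      = acc ++ l.filter PySem.Chars.isdigit := by
  induction l generalizing acc with
  | nil => simp
  | cons x t ih =>
    simp only [List.foldl_cons, List.filter_cons]
    by_cases h : PySem.Chars.isdigit x <;> simp [h, ih]

-- A's scan computes an element of m0 :: t …
theorem foldl_min_mem (t : List Char) (a : Char) :
    t.foldl (fun mn i => if i < mn then i else mn) a ∈ a :: t := by
  induction t generalizing a with
  | nil => simp
  | cons x t ih =>
    simp only [List.foldl_cons]
    by_cases h : x < a
    · simp only [if_pos h]
      rcases List.mem_cons.mp (ih x) with h' | h' <;> simp [h']
    · simp only [if_neg h]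
      rcases List.mem_cons.mp (ih a) with h' | h' <;> simp [h']

-- … that is a lower bound of the accumulator and of every element scanned
theorem foldl_min_le (t : List Char) (a : Char) :
    t.foldl (fun mn i => if i < mn then i else mn) a ≤ a ∧
      ∀ x ∈ t, t.foldl (fun mn i => if i < mn then i else mn) a ≤ x := by
  induction t generalizing a with
  | nil => simp
  | cons y t ih =>
    simp only [List.foldl_cons]
    obtain ⟨h1, h2⟩ := ih (if y < a then y else a)
    constructor
    · refine le_trans h1 ?_
      split_ifs with h
      · exact le_of_lt h
      · exact le_refl a
    · intro x hx
      rcases List.mem_cons.mp hx with rfl | hx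
      · refine le_trans h1 ?_
        split_ifs with h
        · exact le_refl x
        · exact not_lt.mp h
      · exact h2 x hx

-- ===== VERDICT (by name: the statement is the Claim_ definition above) =====
theorem minNumberInStr_spec : Claim_equal_minNumberInStr := by
  intro str _ hpre
  unfold Spec_minNumberInStr minNumberInStr minNumberInStr_alt
  simp only [foldl_append_filter, List.nil_append]
  set ds := str.toList.filter PySem.Chars.isdigit with hds
  have hne : ds ≠ [] := by
    simp only [hds, ne_eq, List.filter_eq_nil_iff, not_forall]
    obtain ⟨x, hx, hdx⟩ := List.any_eq_true.mp hpre
    exact ⟨x, hx, by simp [hdx]⟩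
  obtain ⟨m0, t, hcons⟩ := List.exists_cons_of_ne_nil hne
  have hsne : PySem.List.sorted ds (fun c => c) false ≠ [] := by
    simpa [PySem.List.sorted_eq_nil_iff] using hne
  obtain ⟨s0, st, hscons⟩ := List.exists_cons_of_ne_nil hsne
  rw [hcons] at hscons ⊢
  rw [hscons]
  simp only [PySem.List.pyGet?, PySem.List.pyIdx?]
  norm_num
  -- both sides are one-character strings; show the minima coincide
  set fm := t.foldl (fun mn i => if i < mn then i else mn) m0 with hfm
  have hfm_mem : fm ∈ m0 :: t := foldl_min_mem t m0
  have hfm_le : ∀ x ∈ m0 :: t, fm ≤ x := by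
    intro x hx
    rcases List.mem_cons.mp hx with rfl | hx
    · exact (foldl_min_le t x).1
    · exact (foldl_min_le t m0).2 x hx
  have hs0_mem : s0 ∈ m0 :: t := by
    have hp := PySem.List.sorted_perm (xs := m0 :: t) (key := fun c => c) (rev := false)
    rw [hscons] at hp
    exact hp.mem_iff.mp (List.mem_cons_self ..)
  have hs0_le : ∀ y ∈ m0 :: t, s0 ≤ y :=
    PySem.List.key_head_sorted_le (xs := m0 :: t) (key := fun c => c) hscons
  have : fm = s0 := le_antisymm (hfm_le s0 hs0_mem) (hs0_le fm hfm_mem)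
  rw [this]
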